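-- pv_equiv track=rewrite | github.com/matvey83/softChord | pyjamas-0.7/doc/book/Chapter.py | urlmap
-- ===== SOURCE A (Python) =====
-- def escape(txt, esc=1):
--     if not esc:
--         return txt
--     txt = txt.replace("&", "&amp;")
--     txt = txt.replace("<", "&lt;")
--     txt = txt.replace(">", "&gt;")
--     txt = txt.replace("%", "&#37;")
--     return txt
--
-- def urlmap(txt, esc=1):
--     idx = txt.find("http://")
--     if idx == -1:
--         idx = txt.find("https://")
--     if idx == -1:
--         return escape(txt, esc)
--     for i in range(idx+7, len(txt)):
--         c = txt[i]
--         if c == ' ' or c == '\n' or c == '\t' or c == ',' or c == '<' or c == ')' or c == '(' or c == '>':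
--             i -= 1
--             break
--         # full-stop space test
--         if i != len(txt)-1:
--             c1 = txt[i+1]
--             if (c1 == ' ' or c1 == '\n') and (c == '.' or c == ':'):
--                 i -= 1
--                 break
--
--     i += 1
--
--     beg = txt[:idx]
--     if i == len(txt):
--         url = txt[idx:]
--         end = ''
--     else:
--         url = txt[idx:i]
--         end = txt[i:]
--     txt = escape(beg, esc) + "<a href='%s'>" % url
--     txt += "%s</a>" % escape(url) + urlmap(end, esc)
--     return txt
-- ===== SOURCE B (Python) =====
-- def escape(txt, esc=1):
--     if not esc:
--         return txt
--     txt = txt.replace("&", "&amp;")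
--     txt = txt.replace("<", "&lt;")
--     txt = txt.replace(">", "&gt;")
--     txt = txt.replace("%", "&#37;")
--     return txt
--
-- def urlmap(txt, esc=1):
--     parts = []
--     rest = txt
--     while True:
--         idx = rest.find("http://")
--         if idx == -1:
--             idx = rest.find("https://")
--         if idx == -1:
--             parts.append(escape(rest, esc))
--             break
--         n = len(rest)
--         j = idx + 7
--         while j < n:
--             c = rest[j]
--             if c in " \n\t,<>()":
--                 break
--             if j + 1 < n and c in ".:" and rest[j + 1] in " \n":
--                 break
--             j += 1
--         url = rest[idx:j]
--         parts.append(escape(rest[:idx], esc)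
--                      + "<a href='" + url + "'>" + escape(url) + "</a>")
--         rest = rest[j:]
--     return "".join(parts)
-- ===== Notes on version B (the rewrite author's own statement) =====
-- stated objective: idiomatic
-- what changed: A's tail recursion (re-finding and re-concatenating strings at each level) becomes a single while loop over the shrinking remainder that collects parts in a list joined once at the end, and the for/break scan with its i-=1/i+=1 adjustments becomes a plain index-advancing while loop. (Where A raises NameError — a bare trailing 'http://', excluded by Pre_ — B instead wraps it as a link.)
import Mathlib
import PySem

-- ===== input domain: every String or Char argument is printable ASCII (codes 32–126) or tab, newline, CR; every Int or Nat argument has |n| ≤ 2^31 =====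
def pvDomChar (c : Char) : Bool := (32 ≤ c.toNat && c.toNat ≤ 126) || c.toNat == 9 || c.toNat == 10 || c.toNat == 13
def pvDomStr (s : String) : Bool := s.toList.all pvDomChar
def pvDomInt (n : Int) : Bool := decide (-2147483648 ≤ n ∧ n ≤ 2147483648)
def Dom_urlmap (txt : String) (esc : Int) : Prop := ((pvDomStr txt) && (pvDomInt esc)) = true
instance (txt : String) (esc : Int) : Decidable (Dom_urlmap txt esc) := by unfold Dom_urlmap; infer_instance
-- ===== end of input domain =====

-- B rewrites A's tail recursion as a while loop collecting parts joined once (idiomatic); return value only (no mutation in either).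

-- shared helper: the module's `escape(txt, esc)` (identical code in A's module and in Source B)
def pyEscape (cs : List Char) (esc : Int) : List Char :=
  if esc = 0 then cs
  else
    let t1 := PySem.Chars.replace cs "&".toList "&amp;".toList
    let t2 := PySem.Chars.replace t1 "<".toList "&lt;".toList
    let t3 := PySem.Chars.replace t2 ">".toList "&gt;".toList
    PySem.Chars.replace t3 "%".toList "&#37;".toList

-- ===== PORT A =====
-- A's `for i in range(idx+7, len(txt))` with its two break tests (`c = txt[i]` inlined); returns
-- Python's final i AFTER the loop (before the `i += 1`).  In the empty-range case (i ≥ cs.length at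
-- entry) Python leaves i unbound and the subsequent `i += 1` raises NameError — those inputs are
-- excluded by Pre_urlmap; the port returns i - 1 there.
def scanA (fuel : Nat) (cs : List Char) (i : Nat) : Nat :=
  match fuel with
  | 0 => i - 1
  | fuel + 1 =>
    if h : i < cs.length then
      if cs[i] == ' ' || cs[i] == '\n' || cs[i] == '\t' || cs[i] == ',' || cs[i] == '<' || cs[i] == ')' || cs[i] == '(' || cs[i] == '>' then
        i - 1
      else if h2 : i + 1 < cs.length then   -- `if i != len(txt)-1` (given i < len)
        if (cs[i + 1] == ' ' || cs[i + 1] == '\n') && (cs[i] == '.' || cs[i] == ':') then i - 1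
        else scanA fuel cs (i + 1)
      else i                                -- loop exhausted: i stays len-1
    else i - 1

-- A's recursion, on code points, with fuel as a totality guard only (each recursive call drops at
-- least the matched "http://" from the front, so cs.length + 1 steps always suffice).
def urlmapA (fuel : Nat) (cs : List Char) (esc : Int) : List Char :=
  match fuel with
  | 0 => []
  | fuel + 1 =>
    let idx0 := PySem.Chars.find cs "http://".toList
    let idx := if idx0 = -1 then PySem.Chars.find cs "https://".toList else idx0
    if idx = -1 then pyEscape cs esc
    else
      let i := scanA (cs.length + 1) cs (idx.toNat + 7) + 1
      let beg := PySem.List.slice cs none (some idx)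
      let url := if i = cs.length then PySem.List.slice cs (some idx) none
                 else PySem.List.slice cs (some idx) (some (i : Int))
      let endS := if i = cs.length then ([] : List Char) else PySem.List.slice cs (some (i : Int)) none
      pyEscape beg esc ++ "<a href='".toList ++ url ++ "'>".toList
        ++ pyEscape url 1 ++ "</a>".toList ++ urlmapA fuel endS esc

def urlmap (txt : String) (esc : Int) : String :=
  String.ofList (urlmapA (txt.toList.length + 1) txt.toList esc)

-- ===== PORT B =====
-- Source B's inner `while j < n` scan (`c = rest[j]` inlined); a single-character `c in "…"` membership
-- is Python substring search on a 1-character string, ported as PySem.Chars.isIn [c] _.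
def scanB (fuel : Nat) (cs : List Char) (j : Nat) : Nat :=
  match fuel with
  | 0 => j
  | fuel + 1 =>
    if h : j < cs.length then
      if PySem.Chars.isIn [cs[j]] " \n\t,<>()".toList then j
      else if h2 : j + 1 < cs.length then
        if PySem.Chars.isIn [cs[j]] ".:".toList && PySem.Chars.isIn [cs[j + 1]] " \n".toList then j
        else scanB fuel cs (j + 1)
      else scanB fuel cs (j + 1)
    else j

-- Source B's outer `while True` loop: tail recursion over the shrinking remainder, accumulating the
-- parts list (fuel is a totality guard only, as in port A).
def urlmapBgo (fuel : Nat) (rest : List Char) (acc : List (List Char)) (esc : Int) : List (List Char) :=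
  match fuel with
  | 0 => acc
  | fuel + 1 =>
    let idx0 := PySem.Chars.find rest "http://".toList
    let idx := if idx0 = -1 then PySem.Chars.find rest "https://".toList else idx0
    if idx = -1 then acc ++ [pyEscape rest esc]
    else
      let j := scanB (rest.length + 1) rest (idx.toNat + 7)
      let url := PySem.List.slice rest (some idx) (some (j : Int))
      urlmapBgo fuel (PySem.List.slice rest (some (j : Int)) none)
        (acc ++ [pyEscape (PySem.List.slice rest none (some idx)) esc
                  ++ "<a href='".toList ++ url ++ "'>".toList
                  ++ pyEscape url 1 ++ "</a>".toList]) esc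

def urlmap_alt (txt : String) (esc : Int) : String :=
  String.ofList (PySem.Chars.join [] (urlmapBgo (txt.toList.length + 1) txt.toList [] esc))

-- ===== PRECONDITION & SPEC =====
-- Pre_ excludes strings ending with "http://": when that bare trailing scheme becomes the detected
-- URL, A's scan range is empty, its loop variable stays unbound and `i += 1` raises NameError.  On
-- the few such strings where the trailing occurrence is swallowed by an earlier URL, A still returns
-- (and agrees with B) — the exclusion is slightly wider than the raise set (see cites).
def Pre_urlmap (txt : String) (esc : Int) : Prop :=
  PySem.Chars.endswith txt.toList "http://".toList = false
instance (txt : String) (esc : Int) : Decidable (Pre_urlmap txt esc) := by unfold Pre_urlmap; infer_instance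

def pvWitness_urlmap : String × Int := ("see http://a.io, ok", 1)

def Spec_urlmap (txt : String) (esc : Int) (out : String) : Prop := out = urlmap_alt txt esc
instance (txt : String) (esc : Int) (out : String) : Decidable (Spec_urlmap txt esc out) := by unfold Spec_urlmap; infer_instance

-- ===== CLAIM (what is proved, stated in full; the proofs are below) =====
def Claim_equal_urlmap : Prop := ∀ (txt : String) (esc : Int), Dom_urlmap txt esc → Pre_urlmap txt esc → Spec_urlmap txt esc (urlmap txt esc)
-- ===== LEMMAS AND PROOFS =====

lemma isIn_singleton (c : Char) (l : List Char) : PySem.Chars.isIn [c] l = l.contains c := by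
  rcases h : PySem.Chars.isIn [c] l with _ | _
  · rw [PySem.Chars.isIn_eq_false_iff] at h
    rw [List.singleton_infix_iff] at h
    simp [h]
  · rw [PySem.Chars.isIn_iff_infix, List.singleton_infix_iff] at h
    simp [h]

-- A's break-character test and Source B's `c in " \n\t,<>()"` agree
lemma break1_eq (c : Char) :
    (c == ' ' || c == '\n' || c == '\t' || c == ',' || c == '<' || c == ')' || c == '(' || c == '>')
      = PySem.Chars.isIn [c] " \n\t,<>()".toList := by
  rw [isIn_singleton]
  show _ = ([' ', '\n', '\t', ',', '<', '>', '(', ')'] : List Char).contains c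
  simp only [List.contains_cons, List.contains_nil, Bool.or_false]
  cases h1 : c == '(' <;> cases h2 : c == ')' <;> simp_all [Bool.or_assoc]

-- A's full-stop test and Source B's `c in ".:" and rest[j+1] in " \n"` agree
lemma break2_eq (c c1 : Char) :
    ((c1 == ' ' || c1 == '\n') && (c == '.' || c == ':'))
      = (PySem.Chars.isIn [c] ".:".toList && PySem.Chars.isIn [c1] " \n".toList) := by
  rw [isIn_singleton, isIn_singleton]
  show _ = ((['.', ':'] : List Char).contains c && ([' ', '\n'] : List Char).contains c1)
  simp only [List.contains_cons, List.contains_nil, Bool.or_false]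
  rw [Bool.and_comm]

-- B's scan is the identity once j has left the string
lemma scanB_out (cs : List Char) : ∀ (k j : Nat), ¬ j < cs.length → scanB k cs j = j := by
  intro k j hj
  cases k with
  | zero => rfl
  | succ k => simp only [scanB]; rw [dif_neg hj]

-- the two scans agree (any common fuel): B's stop index is A's final i plus the `i += 1`
lemma scan_eq (cs : List Char) : ∀ (k i : Nat), 1 ≤ i → scanA k cs i + 1 = scanB k cs i := by
  intro k
  induction k with
  | zero =>
    intro i h1
    simp only [scanA, scanB]
    omega
  | succ k ih =>
    intro i h1
    simp only [scanA, scanB]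
    by_cases h : i < cs.length
    · rw [dif_pos h, dif_pos h, break1_eq]
      by_cases hb : PySem.Chars.isIn [cs[i]] " \n\t,<>()".toList
      · simp only [hb, if_true]
        omega
      · simp only [hb, if_false, Bool.false_eq_true]
        by_cases h2 : i + 1 < cs.length
        · rw [dif_pos h2, dif_pos h2, break2_eq]
          by_cases hd : (PySem.Chars.isIn [cs[i]] ".:".toList && PySem.Chars.isIn [cs[i + 1]] " \n".toList)
          · simp only [hd, if_true]
            omega
          · simp only [hd, if_false, Bool.false_eq_true]
            exact ih (i + 1) (by omega)
        · rw [dif_neg h2, dif_neg h2, scanB_out cs k (i + 1) h2]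
    · rw [dif_neg h, dif_neg h]
      omega

-- `"".join` over an appended part
lemma join0_append (acc : List (List Char)) (x : List Char) :
    PySem.Chars.join [] (acc ++ [x]) = PySem.Chars.join [] acc ++ x := by
  induction acc with
  | nil => simp [PySem.Chars.join_nil, PySem.Chars.join_singleton]
  | cons a as ih =>
    cases as with
    | nil => simp [PySem.Chars.join_singleton, PySem.Chars.join_cons_cons]
    | cons b bs =>
      rw [List.cons_append, List.cons_append, PySem.Chars.join_cons_cons, PySem.Chars.join_cons_cons,
        ← List.cons_append, ih]
      simp

-- main loop invariant: B's accumulator loop computes A's recursion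
lemma go_join (fuel : Nat) (rest : List Char) (acc : List (List Char)) (esc : Int) :
    PySem.Chars.join [] (urlmapBgo fuel rest acc esc)
      = PySem.Chars.join [] acc ++ urlmapA fuel rest esc := by
  induction fuel generalizing rest acc with
  | zero => simp [urlmapBgo, urlmapA]
  | succ fuel ih =>
    rw [urlmapBgo, urlmapA]
    simp only
    set I := (if PySem.Chars.find rest "http://".toList = -1
              then PySem.Chars.find rest "https://".toList
              else PySem.Chars.find rest "http://".toList) with hI
    have hIge : -1 ≤ I := by
      rw [hI]; split <;> exact PySem.Chars.neg_one_le_find _ _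
    by_cases hidx : I = -1
    · rw [if_pos hidx, if_pos hidx, join0_append]
    · rw [if_neg hidx, if_neg hidx]
      have h0 : 0 ≤ I := by omega
      set n := I.toNat with hn
      have hIc : I = (n : Int) := (Int.toNat_of_nonneg h0).symm
      have hj : scanB (rest.length + 1) rest (n + 7) = scanA (rest.length + 1) rest (n + 7) + 1 :=
        (scan_eq rest (rest.length + 1) (n + 7) (by omega)).symm
      rw [hj]
      set i := scanA (rest.length + 1) rest (n + 7) + 1 with hi
      have s1 : PySem.List.slice rest none (some I) = List.take n rest := by
        rw [hIc, PySem.List.slice_to rest (by omega)]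
        simp
      have s2 : PySem.List.slice rest (some I) (some (i : Int)) = List.take (i - n) (List.drop n rest) := by
        rw [hIc]
        exact_mod_cast PySem.List.slice_natCast rest n i
      have s3 : PySem.List.slice rest (some I) none = List.drop n rest := by
        rw [hIc, PySem.List.slice_from rest (by omega)]
        simp
      have s4 : PySem.List.slice rest (some (i : Int)) none = List.drop i rest := by
        rw [PySem.List.slice_from rest (by omega)]
        simp
      rw [s1, s2, s3, s4]
      have hu : (if i = rest.length then List.drop n rest else List.take (i - n) (List.drop n rest))
          = List.take (i - n) (List.drop n rest) := by
        split_ifs with hlen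
        · exact (List.take_of_length_le (by simp [hlen])).symm
        · rfl
      have he : (if i = rest.length then ([] : List Char) else List.drop i rest) = List.drop i rest := by
        split_ifs with hlen
        · simp [hlen]
        · rfl
      rw [hu, he, ih, join0_append]
      simp [List.append_assoc]

-- ===== VERDICT (by name: the statement is the Claim_ definition above) =====
theorem urlmap_spec : Claim_equal_urlmap := by
  intro txt esc _ _
  unfold Spec_urlmap urlmap urlmap_alt
  rw [go_join, PySem.Chars.join_nil, List.nil_append]
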